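-- pv_equiv track=rewrite | github.com/ArseniiMaiorov/Kyrsovaya_Skobtsov_jr | src/utils/reproducibility.py | _sanitize_stage_name
-- ===== SOURCE A (Python) =====
-- class ReproducibilityError(ValueError):
--     """Исключение для ошибок воспроизводимости и артефактов запуска."""
--
-- def _sanitize_stage_name(stage_name: str) -> str:
--     if not isinstance(stage_name, str) or not stage_name.strip():
--         raise ReproducibilityError("stage_name должен быть непустой строкой")
--
--     normalized = "".join(char if char.isalnum() else "_" for char in stage_name.strip().lower())
--     while "__" in normalized:
--         normalized = normalized.replace("__", "_")
--
--     normalized = normalized.strip("_")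
--     return normalized or "runtime"
-- ===== SOURCE B (Python) =====
-- class ReproducibilityError(ValueError):
--     """Исключение для ошибок воспроизводимости и артефактов запуска."""
--
-- def _sanitize_stage_name(stage_name: str) -> str:
--     if not isinstance(stage_name, str) or not stage_name.strip():
--         raise ReproducibilityError("stage_name должен быть непустой строкой")
--
--     out = []
--     for char in stage_name.strip().lower():
--         if char.isalnum():
--             out.append(char)
--         elif out and out[-1] != "_":
--             out.append("_")
--     result = "".join(out).strip("_")
--     return result or "runtime"
-- ===== Notes on version B (the rewrite author's own statement) =====
-- stated objective: simpler
-- what changed: Replaces the map-to-underscores pass plus the repeated whole-string double-underscore-replacement fixpoint loop by a single pass that appends an alnum char directly and an underscore only when the last emitted char is not already an underscore, then strips underscores from the ends as before.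
import Mathlib
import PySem

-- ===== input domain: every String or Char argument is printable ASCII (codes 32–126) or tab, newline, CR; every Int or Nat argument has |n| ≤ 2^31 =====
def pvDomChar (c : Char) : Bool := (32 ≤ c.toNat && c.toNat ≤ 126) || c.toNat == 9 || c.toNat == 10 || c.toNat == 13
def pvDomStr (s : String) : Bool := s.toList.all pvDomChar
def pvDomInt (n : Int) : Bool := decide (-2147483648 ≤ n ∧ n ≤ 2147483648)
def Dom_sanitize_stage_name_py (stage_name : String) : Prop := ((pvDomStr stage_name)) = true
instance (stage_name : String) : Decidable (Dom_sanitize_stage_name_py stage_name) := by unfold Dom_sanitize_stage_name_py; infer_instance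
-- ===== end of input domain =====

-- B replaces A's repeated whole-string replace('__','_') fixpoint loop by one linear pass that
-- squeezes consecutive underscores as it emits them; equivalence of return values proved below.

-- ===== PORT A =====
-- helpers needed by port A's termination proof: a structural characterisation of
-- replace(cs, "__", "_") and the fact that it shortens the string when "__" occurs.
def pvRep : List Char → List Char
  | [] => []
  | [c] => [c]
  | c :: d :: r => if c = '_' ∧ d = '_' then '_' :: pvRep r else c :: pvRep (d :: r)

theorem pv_go_eq : ∀ (fuel : Nat) (l acc : List Char), l.length ≤ fuel →
    PySem.Chars.replace.go ['_','_'] ['_'] fuel l acc = acc.reverse ++ pvRep l := by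
  intro fuel
  induction fuel with
  | zero =>
    intro l acc h
    have : l = [] := List.length_eq_zero_iff.mp (Nat.le_zero.mp h)
    subst this
    simp [PySem.Chars.replace.go, pvRep]
  | succ n ih =>
    intro l acc h
    match l with
    | [] => simp [PySem.Chars.replace.go, pvRep]
    | c :: t =>
      rw [PySem.Chars.replace.go]
      by_cases hp : List.isPrefixOf ['_','_'] (c :: t) = true
      · have hpre := List.isPrefixOf_iff_prefix.mp hp
        match t with
        | [] => simp at hpre
        | d :: r =>
          obtain ⟨hc, hdr⟩ := List.cons_prefix_cons.mp hpre
          obtain ⟨hd, -⟩ := List.cons_prefix_cons.mp hdr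
          subst hc; subst hd
          rw [if_pos hp]
          simp only [List.length_cons, List.length_nil, List.drop_succ_cons, List.drop_zero,
            List.reverse_cons, List.reverse_nil, List.nil_append, List.singleton_append]
          have hlen : r.length ≤ n := by simp at h; omega
          rw [ih _ _ hlen]
          simp [pvRep]
      · simp only [hp, if_neg, Bool.false_eq_true, not_false_eq_true]
        have hlen : t.length ≤ n := by simp at h; omega
        rw [ih _ _ hlen]
        match t with
        | [] => simp [pvRep]
        | d :: r =>
          have : ¬ (c = '_' ∧ d = '_') := by
            intro ⟨h1, h2⟩
            subst h1; subst h2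
            exact hp (List.isPrefixOf_iff_prefix.mpr (by simp))
          simp [pvRep, this]

theorem pv_replace_eq (cs : List Char) :
    PySem.Chars.replace cs ['_','_'] ['_'] = pvRep cs := by
  have := pv_go_eq cs.length cs [] le_rfl
  simpa [PySem.Chars.replace] using this

theorem pvRep_length_le (cs : List Char) : (pvRep cs).length ≤ cs.length := by
  induction cs using pvRep.induct with
  | case1 => simp [pvRep]
  | case2 c => simp [pvRep]
  | case3 c d r h ih =>
    obtain ⟨hc, hd⟩ := h; subst hc; subst hd
    rw [pvRep, if_pos ⟨rfl, rfl⟩]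
    simp only [List.length_cons]; omega
  | case4 c d r h ih =>
    rw [pvRep, if_neg h]
    simp only [List.length_cons] at ih ⊢; omega

theorem pvRep_length_lt (cs : List Char) (h : ['_','_'] <:+: cs) :
    (pvRep cs).length < cs.length := by
  induction cs using pvRep.induct with
  | case1 => simp at h
  | case2 c =>
    exfalso
    have := h.length_le
    simp at this
  | case3 c d r hcd ih =>
    obtain ⟨hc, hd⟩ := hcd; subst hc; subst hd
    rw [pvRep, if_pos ⟨rfl, rfl⟩]
    have := pvRep_length_le r
    simp only [List.length_cons]; omega
  | case4 c d r hcd ih =>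
    have h' : ['_','_'] <:+: d :: r := by
      rcases List.infix_cons_iff.mp h with hpre | htail
      · exfalso
        rcases List.cons_prefix_cons.mp hpre with ⟨h1, hdr⟩
        rcases List.cons_prefix_cons.mp hdr with ⟨h2, -⟩
        exact hcd ⟨h1.symm, h2.symm⟩
      · exact htail
    have := ih h'
    rw [pvRep, if_neg hcd]
    simp only [List.length_cons] at this ⊢; omega

theorem pv_replace_lt (cs : List Char) (h : PySem.Chars.isIn ['_','_'] cs = true) :
    (PySem.Chars.replace cs ['_','_'] ['_']).length < cs.length := by
  rw [pv_replace_eq]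
  exact pvRep_length_lt cs ((PySem.Chars.isIn_iff_infix _ _).mp h)

-- A's while-loop:  while "__" in normalized: normalized = normalized.replace("__", "_")
def pvCollapseA (cs : List Char) : List Char :=
  if h : PySem.Chars.isIn ['_','_'] cs = true then
    pvCollapseA (PySem.Chars.replace cs ['_','_'] ['_'])
  else cs
termination_by cs.length
decreasing_by exact pv_replace_lt cs h

def sanitize_stage_name_py (stage_name : String) : String :=
  -- guard `not isinstance(...) or not stage_name.strip()` raises: excluded by Pre_
  let normalized := (PySem.Chars.lower (PySem.Chars.strip stage_name.toList)).map
    (fun c => if PySem.Chars.isalnum c = true then c else '_')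
  let collapsed := pvCollapseA normalized
  let stripped := PySem.Chars.stripChars collapsed ['_']
  if stripped = [] then "runtime" else String.ofList stripped

-- ===== PORT B =====
def sanitize_stage_name_py_alt (stage_name : String) : String :=
  let out := (PySem.Chars.lower (PySem.Chars.strip stage_name.toList)).foldl
    (fun acc c =>
      if PySem.Chars.isalnum c = true then acc ++ [c]
      else if acc ≠ [] ∧ acc.getLast? ≠ some '_' then acc ++ ['_'] else acc) []
  let result := PySem.Chars.stripChars out ['_']
  if result = [] then "runtime" else String.ofList result

-- ===== PRECONDITION & SPEC =====
-- Pre_ excludes exactly the inputs on which A (and B) raise ReproducibilityError: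
-- strings that are empty or whitespace-only.
def Pre_sanitize_stage_name_py (stage_name : String) : Prop :=
  PySem.Chars.strip stage_name.toList ≠ []
instance (stage_name : String) : Decidable (Pre_sanitize_stage_name_py stage_name) := by
  unfold Pre_sanitize_stage_name_py; infer_instance

def pvWitness_sanitize_stage_name_py : String := " My Stage-1 "

def Spec_sanitize_stage_name_py (stage_name : String) (out : String) : Prop := out = sanitize_stage_name_py_alt stage_name
instance (stage_name : String) (out : String) : Decidable (Spec_sanitize_stage_name_py stage_name out) := by unfold Spec_sanitize_stage_name_py; infer_instance

-- ===== CLAIM (what is proved, stated in full; the proofs are below) =====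
def Claim_equal_sanitize_stage_name_py : Prop := ∀ (stage_name : String), Dom_sanitize_stage_name_py stage_name → Pre_sanitize_stage_name_py stage_name → Spec_sanitize_stage_name_py stage_name (sanitize_stage_name_py stage_name)

-- ===== LEMMAS AND PROOFS =====

-- drop leading underscores
def pvDW (x : List Char) : List Char := x.dropWhile (fun c => c == '_')

-- canonical squeezed form: every run of '_' collapsed to a single '_'
def pvSqueeze : List Char → List Char
  | [] => []
  | c :: r =>
    if c = '_' then '_' :: pvSqueeze (pvDW r) else c :: pvSqueeze r
termination_by cs => cs.length
decreasing_by
  all_goals simp only [pvDW, List.length_cons]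
  · have := List.length_dropWhile_le (fun c => c == '_') r
    omega
  · omega

theorem pvSqueeze_nil : pvSqueeze [] = [] := by
  rw [pvSqueeze]

theorem pvSqueeze_cons_us (r : List Char) : pvSqueeze ('_' :: r) = '_' :: pvSqueeze (pvDW r) := by
  rw [pvSqueeze]
  simp

theorem pvSqueeze_cons_ne {c : Char} (h : c ≠ '_') (r : List Char) :
    pvSqueeze (c :: r) = c :: pvSqueeze r := by
  rw [pvSqueeze]
  simp [h]

theorem pvDW_nil : pvDW [] = [] := rfl

theorem pvDW_cons_ne {c : Char} (h : c ≠ '_') (r : List Char) : pvDW (c :: r) = c :: r := by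
  simp [pvDW, h]

theorem pvDW_cons_us (r : List Char) : pvDW ('_' :: r) = pvDW r := by
  simp [pvDW]

theorem pvDW_pvDW (x : List Char) : pvDW (pvDW x) = pvDW x := by
  induction x with
  | nil => rfl
  | cons c r ih =>
    by_cases h : c = '_'
    · subst h; rw [pvDW_cons_us]; exact ih
    · rw [pvDW_cons_ne h, pvDW_cons_ne h]

theorem pvDW_squeeze_pvDW (r : List Char) : pvDW (pvSqueeze (pvDW r)) = pvSqueeze (pvDW r) := by
  induction r with
  | nil => simp [pvDW_nil, pvSqueeze_nil]
  | cons c t ih =>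
    by_cases h : c = '_'
    · subst h; rw [pvDW_cons_us]; exact ih
    · rw [pvDW_cons_ne h, pvSqueeze_cons_ne h, pvDW_cons_ne h]

theorem pv_squeeze_dw (x : List Char) : pvSqueeze (pvDW x) = pvDW (pvSqueeze x) := by
  cases x with
  | nil => simp [pvDW_nil, pvSqueeze_nil]
  | cons c r =>
    by_cases h : c = '_'
    · subst h
      rw [pvDW_cons_us, pvSqueeze_cons_us, pvDW_cons_us]
      exact (pvDW_squeeze_pvDW r).symm
    · rw [pvDW_cons_ne h, pvSqueeze_cons_ne h, pvDW_cons_ne h]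

theorem pvRep_head_ne {d : Char} (hd : d ≠ '_') (r : List Char) :
    pvDW (pvRep (d :: r)) = pvRep (d :: r) := by
  cases r with
  | nil => simp [pvRep, pvDW_cons_ne hd]
  | cons e r' =>
    have : ¬ (d = '_' ∧ e = '_') := fun ⟨h1, _⟩ => hd h1
    rw [pvRep, if_neg this, pvDW_cons_ne hd]

theorem pv_squeeze_rep (cs : List Char) :
    pvSqueeze (pvRep cs) = pvSqueeze cs ∧ pvSqueeze (pvDW (pvRep cs)) = pvSqueeze (pvDW cs) := by
  induction cs using pvRep.induct with
  | case1 => simp [pvRep]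
  | case2 c => simp [pvRep]
  | case3 c d r h ih =>
    obtain ⟨hc, hd⟩ := h
    subst hc; subst hd
    rw [pvRep, if_pos ⟨rfl, rfl⟩]
    constructor
    · rw [pvSqueeze_cons_us, pvSqueeze_cons_us, pvDW_cons_us, ih.2]
    · rw [pvDW_cons_us, pvDW_cons_us, pvDW_cons_us, ih.2]
  | case4 c d r h ih =>
    rw [pvRep, if_neg h]
    by_cases hc : c = '_'
    · subst hc
      have hd : d ≠ '_' := fun hd => h ⟨rfl, hd⟩
      constructor
      · rw [pvSqueeze_cons_us, pvSqueeze_cons_us, pvRep_head_ne hd, pvDW_cons_ne hd, ih.1]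
      · rw [pvDW_cons_us, pvDW_cons_us, pvRep_head_ne hd, pvDW_cons_ne hd, ih.1]
    · constructor
      · rw [pvSqueeze_cons_ne hc, pvSqueeze_cons_ne hc, ih.1]
      · rw [pvDW_cons_ne hc, pvDW_cons_ne hc, pvSqueeze_cons_ne hc, pvSqueeze_cons_ne hc, ih.1]

theorem pv_squeeze_noDD (cs : List Char) (h : ¬ ['_','_'] <:+: cs) : pvSqueeze cs = cs := by
  induction cs with
  | nil => exact pvSqueeze_nil
  | cons c r ih =>
    have hr : ¬ ['_','_'] <:+: r := fun ht => h (List.infix_cons ht)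
    by_cases hc : c = '_'
    · subst hc
      have hdr : pvDW r = r := by
        cases r with
        | nil => exact pvDW_nil
        | cons d t =>
          have hd : d ≠ '_' := by
            intro hd; subst hd
            exact h (List.infix_cons_iff.mpr (Or.inl (by simp)))
          exact pvDW_cons_ne hd t
      rw [pvSqueeze_cons_us, hdr, ih hr]
    · rw [pvSqueeze_cons_ne hc, ih hr]

theorem pvCollapseA_eq_squeeze (cs : List Char) : pvCollapseA cs = pvSqueeze cs := by
  induction cs using pvCollapseA.induct with
  | case1 cs h ih =>
    rw [pvCollapseA, dif_pos h, ih, pv_replace_eq, (pv_squeeze_rep cs).1]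
  | case2 cs h =>
    rw [pvCollapseA, dif_neg h]
    exact (pv_squeeze_noDD cs ((PySem.Chars.isIn_eq_false_iff _ _).mp (by simpa using h))).symm

-- B's fold, related to the squeezed form of the mapped string
theorem pv_isalnum_ne_us {c : Char} (h : PySem.Chars.isalnum c = true) : c ≠ '_' := by
  intro hc; subst hc
  exact absurd h (by decide)

theorem pv_fold3 (cs : List Char) : ∀ (acc : List Char),
    (cs.foldl (fun acc c =>
        if PySem.Chars.isalnum c = true then acc ++ [c]
        else if acc ≠ [] ∧ acc.getLast? ≠ some '_' then acc ++ ['_'] else acc) []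
      = pvDW (pvSqueeze (cs.map (fun c => if PySem.Chars.isalnum c = true then c else '_')))) ∧
    (acc.getLast? = some '_' →
      cs.foldl (fun acc c =>
        if PySem.Chars.isalnum c = true then acc ++ [c]
        else if acc ≠ [] ∧ acc.getLast? ≠ some '_' then acc ++ ['_'] else acc) acc
      = acc ++ pvSqueeze (pvDW (cs.map (fun c => if PySem.Chars.isalnum c = true then c else '_')))) ∧
    (∀ c0, acc.getLast? = some c0 → c0 ≠ '_' →
      cs.foldl (fun acc c =>
        if PySem.Chars.isalnum c = true then acc ++ [c]
        else if acc ≠ [] ∧ acc.getLast? ≠ some '_' then acc ++ ['_'] else acc) acc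
      = acc ++ pvSqueeze (cs.map (fun c => if PySem.Chars.isalnum c = true then c else '_'))) := by
  induction cs with
  | nil =>
    intro acc
    refine ⟨by simp [pvSqueeze_nil, pvDW_nil], fun _ => by simp [pvSqueeze_nil, pvDW_nil],
      fun c0 _ _ => by simp [pvSqueeze_nil]⟩
  | cons c r ih =>
    intro acc
    by_cases h : PySem.Chars.isalnum c = true
    · have hcu : c ≠ '_' := pv_isalnum_ne_us h
      refine ⟨?_, fun hlast => ?_, fun c0 hlast hc0 => ?_⟩
      · simp only [List.foldl_cons, if_pos h, List.map_cons, List.nil_append]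
        rw [(ih [c]).2.2 c (by simp) hcu, pvSqueeze_cons_ne hcu, pvDW_cons_ne hcu]
        simp
      · simp only [List.foldl_cons, if_pos h, List.map_cons]
        rw [(ih (acc ++ [c])).2.2 c (by simp) hcu, pvDW_cons_ne hcu,
          pvSqueeze_cons_ne hcu, List.append_assoc]
        simp
      · simp only [List.foldl_cons, if_pos h, List.map_cons]
        rw [(ih (acc ++ [c])).2.2 c (by simp) hcu, pvSqueeze_cons_ne hcu,
          List.append_assoc]
        simp
    · refine ⟨?_, fun hlast => ?_, fun c0 hlast hc0 => ?_⟩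
      · simp only [List.foldl_cons, if_neg h, List.map_cons]
        have hcond : ¬ (([] : List Char) ≠ [] ∧ ([] : List Char).getLast? ≠ some '_') := by simp
        rw [if_neg hcond, (ih []).1, pvSqueeze_cons_us, pvDW_cons_us,
          pv_squeeze_dw, pvDW_pvDW]
      · simp only [List.foldl_cons, if_neg h, List.map_cons]
        have hcond : ¬ (acc ≠ [] ∧ acc.getLast? ≠ some '_') := by
          intro ⟨_, h2⟩; exact h2 hlast
        rw [if_neg hcond, (ih acc).2.1 hlast, pvDW_cons_us]
      · simp only [List.foldl_cons, if_neg h, List.map_cons]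
        have hne : acc ≠ [] := by
          intro hnil; subst hnil; simp at hlast
        have hcond : acc ≠ [] ∧ acc.getLast? ≠ some '_' := by
          refine ⟨hne, fun hsome => ?_⟩
          rw [hlast] at hsome
          exact hc0 (Option.some.inj hsome)
        rw [if_pos hcond, (ih (acc ++ ['_'])).2.1 (by simp), pvSqueeze_cons_us,
          List.append_assoc]
        simp

-- stripping '_' from both ends is insensitive to first dropping leading underscores
theorem pv_strip_dw (x : List Char) :
    PySem.Chars.stripChars (pvDW x) ['_'] = PySem.Chars.stripChars x ['_'] := by
  have hp : (fun c => (['_'] : List Char).contains c) = (fun c => c == '_') := by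
    funext c
    simp [List.contains_eq_mem, Bool.beq_eq_decide_eq]
  simp only [PySem.Chars.stripChars, hp]
  show (List.dropWhile _ (pvDW (pvDW x)).reverse).reverse = (List.dropWhile _ (pvDW x).reverse).reverse
  rw [pvDW_pvDW]

-- ===== VERDICT (by name: the statement is the Claim_ definition above) =====
theorem sanitize_stage_name_py_spec : Claim_equal_sanitize_stage_name_py := by
  intro s _ _
  unfold Spec_sanitize_stage_name_py sanitize_stage_name_py sanitize_stage_name_py_alt
  show (if PySem.Chars.stripChars
          (pvCollapseA ((PySem.Chars.lower (PySem.Chars.strip s.toList)).map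
            (fun c => if PySem.Chars.isalnum c = true then c else '_'))) ['_'] = []
        then "runtime"
        else String.ofList (PySem.Chars.stripChars
          (pvCollapseA ((PySem.Chars.lower (PySem.Chars.strip s.toList)).map
            (fun c => if PySem.Chars.isalnum c = true then c else '_'))) ['_'])) =
       (if PySem.Chars.stripChars
          ((PySem.Chars.lower (PySem.Chars.strip s.toList)).foldl
            (fun acc c =>
              if PySem.Chars.isalnum c = true then acc ++ [c]
              else if acc ≠ [] ∧ acc.getLast? ≠ some '_' then acc ++ ['_'] else acc) []) ['_'] = []
        then "runtime"
        else String.ofList (PySem.Chars.stripChars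
          ((PySem.Chars.lower (PySem.Chars.strip s.toList)).foldl
            (fun acc c =>
              if PySem.Chars.isalnum c = true then acc ++ [c]
              else if acc ≠ [] ∧ acc.getLast? ≠ some '_' then acc ++ ['_'] else acc) []) ['_']))
  rw [pvCollapseA_eq_squeeze, (pv_fold3 (PySem.Chars.lower (PySem.Chars.strip s.toList)) []).1,
    pv_strip_dw]
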